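-- pv_equiv track=rewrite | github.com/alexandraback/datacollection | solutions_1483488_1/Python/afruizc/source.py | genRecycledPairs
-- ===== SOURCE A (Python) =====
-- def genRecycledPairs(num, A, B):
-- 	st = list(str(num))
-- 	res = []
-- 	for i in range(len(st)-1):
-- 		st.insert(0, st.pop())
-- 		temp = int(''.join(st))
-- 		if A <= num < temp <= B:
-- 			res.append(temp)
-- 	return res
-- ===== SOURCE B (Python) =====
-- def genRecycledPairs(num, A, B):
--     # Doubled-string windows: each rotation is a slice of s+s, no mutable rotation state.
--     s = str(num)
--     n = len(s)
--     w = s + s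
--     return [v for v in (int(w[j:j+n]) for j in range(n - 1, 0, -1))
--             if A <= num < v <= B]
-- ===== Notes on version B (the rewrite author's own statement) =====
-- stated objective: alternative
-- what changed: B uses the doubled-string technique: it builds w = str(num) + str(num) once and reads each rotation as an independent window int(w[j:j+n]) in a comprehension, instead of A's mutable digit list that is pop/insert-rotated, re-joined and re-parsed to carry state from one iteration to the next.
import Mathlib
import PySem

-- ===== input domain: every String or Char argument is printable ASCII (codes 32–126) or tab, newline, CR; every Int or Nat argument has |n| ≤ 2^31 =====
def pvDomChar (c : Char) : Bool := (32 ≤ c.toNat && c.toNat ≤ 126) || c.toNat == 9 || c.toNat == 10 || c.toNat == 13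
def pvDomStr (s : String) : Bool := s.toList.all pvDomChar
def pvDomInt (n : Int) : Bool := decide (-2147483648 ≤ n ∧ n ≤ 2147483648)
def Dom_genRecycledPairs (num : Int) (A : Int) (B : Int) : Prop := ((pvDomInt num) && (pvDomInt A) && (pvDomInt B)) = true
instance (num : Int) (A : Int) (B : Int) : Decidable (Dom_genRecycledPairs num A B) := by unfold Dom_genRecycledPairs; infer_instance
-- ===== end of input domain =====

-- B replaces A's mutable digit-list (pop/insert rotation re-joined and re-parsed each step) by the
-- doubled-string technique: w = s+s is built once and every rotation is an independent window
-- w[j:j+n]; equivalence is proved for num ≥ 0 (on negative num both raise ValueError).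


-- ===== PORT A =====
-- st.insert(0, st.pop()); temp = int(''.join(st)); conditional append — one loop iteration.
-- pop() (on a list never empty inside the loop) and int() are matched on `none` only to stay
-- total; under Pre_ (num ≥ 0) the `none` branches are unreachable.
def genRecycledPairsStep (num A B : Int) (s : List Char × List Int) : List Char × List Int :=
  match PySem.List.pop? s.1 (-1) with
  | some (x, rest) =>
    let st := PySem.List.insert rest 0 x
    match PySem.Int.ofStr? (String.ofList st) with
    | some temp => (st, if A ≤ num ∧ num < temp ∧ temp ≤ B then s.2 ++ [temp] else s.2)
    | none => (st, s.2)
  | none => s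

def genRecycledPairs (num : Int) (A : Int) (B : Int) : List Int :=
  let st := (PySem.Int.toStr num).toList
  ((PySem.List.pyRange 0 (PySem.List.len st - 1) 1).foldl
      (fun s _ => genRecycledPairsStep num A B s) (st, [])).2

-- ===== PORT B =====
-- v = int(w[j:j+n]); keep v if A <= num < v <= B — one element of Source B's comprehension.
-- int() is matched on `none` only to stay total; under Pre_ it never fails.
def genRecycledPairsAltStep (num A B n : Int) (w : List Char) (res : List Int) (j : Int) : List Int :=
  match PySem.Int.ofStr? (String.ofList (PySem.List.slice w (some j) (some (j + n)))) with
  | some v => if A ≤ num ∧ num < v ∧ v ≤ B then res ++ [v] else res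
  | none => res

def genRecycledPairs_alt (num : Int) (A : Int) (B : Int) : List Int :=
  let s := (PySem.Int.toStr num).toList
  let n : Int := PySem.List.len s
  let w := s ++ s
  (PySem.List.pyRange (n - 1) 0 (-1)).foldl (genRecycledPairsAltStep num A B n w) []

-- ===== PRECONDITION & SPEC =====
-- Pre_ excludes negative num, on which A raises ValueError (the rotation moves the '-' sign into
-- the middle of the digit string and int(''.join(st)) fails); B raises there too.
def Pre_genRecycledPairs (num : Int) (A : Int) (B : Int) : Prop := -1 < num
instance (num : Int) (A : Int) (B : Int) : Decidable (Pre_genRecycledPairs num A B) := by unfold Pre_genRecycledPairs; infer_instance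
def pvWitness_genRecycledPairs : Int × Int × Int := (142, 100, 999)

def Spec_genRecycledPairs (num : Int) (A : Int) (B : Int) (out : List Int) : Prop := out = genRecycledPairs_alt num A B
instance (num : Int) (A : Int) (B : Int) (out : List Int) : Decidable (Spec_genRecycledPairs num A B out) := by unfold Spec_genRecycledPairs; infer_instance

-- ===== CLAIM (what is proved, stated in full; the proofs are below) =====
def Claim_equal_genRecycledPairs : Prop := ∀ (num : Int) (A : Int) (B : Int), Dom_genRecycledPairs num A B → Pre_genRecycledPairs num A B → Spec_genRecycledPairs num A B (genRecycledPairs num A B)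

-- ===== LEMMAS AND PROOFS =====

-- a fold with a constant body is an iterate of the step, counted by the list length
theorem pvFoldlConst {α β : Type} (l : List α) (f : β → β) (init : β) :
    l.foldl (fun s _ => f s) init = f^[l.length] init := by
  induction l generalizing init with
  | nil => rfl
  | cons x xs IH => simp [List.foldl_cons, IH, Function.iterate_succ_apply]

-- A's single step, on the rotation with index j (st = s.drop j ++ s.take j), moves to index j-1
-- and appends exactly what B's window at j-1 contributes.
theorem pvStep (num A B : Int) (s : List Char) (m : Nat) (res : List Int)
    (hm : m + 1 ≤ s.length) :
    genRecycledPairsStep num A B (s.drop (m+1) ++ s.take (m+1), res)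
      = (s.drop m ++ s.take m,
         genRecycledPairsAltStep num A B (s.length : Int) (s ++ s) res ((m : Nat) : Int)) := by
  have hlt : m < s.length := by omega
  have htake : s.take (m+1) = s.take m ++ [s[m]] := by
    rw [List.take_add_one]; simp [List.getElem?_eq_getElem hlt]
  have hst : s.drop (m+1) ++ s.take (m+1) = (s.drop (m+1) ++ s.take m) ++ [s[m]] := by
    rw [htake, List.append_assoc]
  have hrot : s[m] :: (s.drop (m+1) ++ s.take m) = s.drop m ++ s.take m := by
    rw [← List.cons_append, List.getElem_cons_drop hlt]
  have hslice : PySem.List.slice (s ++ s) (some ((m : Nat) : Int)) (some (((m : Nat) : Int) + (s.length : Int)))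
      = s.drop m ++ s.take m := by
    rw [PySem.List.slice_natCast_add]
    rw [List.drop_append_of_le_length (by omega)]
    rw [List.take_append]
    rw [List.take_of_length_le (by simp)]
    congr 2
    simp
    omega
  unfold genRecycledPairsStep genRecycledPairsAltStep
  simp only [hst, PySem.List.pop?_last, PySem.List.insert_zero, hrot, hslice]
  cases PySem.Int.ofStr? (String.ofList (s.drop m ++ s.take m)) <;> rfl

-- loop invariant: with k iterations remaining, A's state is the rotation with index k+1 and the
-- remaining appended values are exactly B's windows k, k-1, …, 1.
theorem pvLoop (num A B : Int) (s : List Char) :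
    ∀ (k : Nat), k < s.length → ∀ (res : List Int),
      ((genRecycledPairsStep num A B)^[k] (s.drop (k+1) ++ s.take (k+1), res)).2
        = (PySem.List.pyRange ((k : Nat) : Int) 0 (-1)).foldl
            (genRecycledPairsAltStep num A B (s.length : Int) (s ++ s)) res := by
  intro k
  induction k with
  | zero =>
    intro _ res
    have h0 : ((0 : Nat) : Int) = 0 := by norm_num
    rw [h0, PySem.List.pyRange_neg_one_eq_nil (le_refl 0)]
    rfl
  | succ k IH =>
    intro hk res
    rw [Function.iterate_succ_apply, pvStep num A B s (k+1) res (by omega), IH (by omega)]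
    have h2 : ((k+1 : Nat) : Int) - 1 = ((k : Nat) : Int) := by push_cast; ring
    conv_rhs => rw [PySem.List.pyRange_neg_one_cons (show (0:Int) < ((k+1:Nat):Int) by push_cast; omega),
                    List.foldl_cons, h2]

theorem pvCore_len (fuel : Nat) : ∀ (n : Nat) (ds : List Char),
    ds.length ≤ (Nat.toDigitsCore 10 fuel n ds).length := by
  induction fuel with
  | zero => intro n ds; simp [Nat.toDigitsCore]
  | succ f IH =>
    intro n ds
    rw [Nat.toDigitsCore]
    split
    · simp
    · exact le_trans (by simp) (IH _ (Nat.digitChar (n % 10) :: ds))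

theorem pvToDigits_ne_nil (n : Nat) : Nat.toDigits 10 n ≠ [] := by
  intro h
  have : (1 : Nat) ≤ (Nat.toDigits 10 n).length := by
    unfold Nat.toDigits
    rw [Nat.toDigitsCore]
    split
    · simp
    · exact le_trans (by simp) (pvCore_len _ _ _)
  rw [h] at this
  simp at this

theorem pvToStr_ne_nil (num : Int) : (PySem.Int.toStr num).toList ≠ [] := by
  rw [PySem.Int.toList_toStr]
  unfold PySem.Int.toChars
  split
  · simp
  · exact pvToDigits_ne_nil _

theorem pvMain (num A B : Int) : genRecycledPairs num A B = genRecycledPairs_alt num A B := by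
  simp only [genRecycledPairs, genRecycledPairs_alt]
  set s := (PySem.Int.toStr num).toList with hs
  have hlen : 1 ≤ s.length := List.length_pos_of_ne_nil (pvToStr_ne_nil num)
  rw [PySem.List.len_eq s]
  rw [pvFoldlConst, PySem.List.length_pyRange_one]
  have hcnt : (((s.length : Int)) - 1 - 0).toNat = s.length - 1 := by omega
  rw [hcnt]
  have hn1 : ((s.length : Int)) - 1 = ((s.length - 1 : Nat) : Int) := by omega
  rw [hn1]
  have hinit : (s, ([] : List Int)) = (s.drop ((s.length - 1) + 1) ++ s.take ((s.length - 1) + 1), ([] : List Int)) := by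
    have h : s.length - 1 + 1 = s.length := by omega
    rw [h]
    simp
  rw [hinit]
  exact pvLoop num A B s (s.length - 1) (by omega) []

-- ===== VERDICT (by name: the statement is the Claim_ definition above) =====
theorem genRecycledPairs_spec : Claim_equal_genRecycledPairs := by
  intro num A B _ _
  unfold Spec_genRecycledPairs
  exact pvMain num A B
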